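-- pv_equiv track=rewrite | github.com/ymtz13/CompetitiveProgramming | AtCoder/ARC140/C.py | f
-- ===== SOURCE A (Python) =====
-- def f(N, d):
--   if N % 2 == 1:
--     v0 = N // 2 + 1
--   else:
--     if d == +1:
--       v0 = N // 2
--     else:
--       v0 = N // 2 + 1
--
--   ret = [v0]
--   for i in range(N - 1):
--     ret.append(ret[-1] + d)
--     d = -(d + 1) if d > 0 else -(d - 1)
--
--   return ret
-- ===== SOURCE B (Python) =====
-- def f(N, d):
--   if N % 2 == 1:
--     v0 = N // 2 + 1
--   elif d == 1:
--     v0 = N // 2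
--   else:
--     v0 = N // 2 + 1
--
--   if d == 0:
--     # offsets 0, 0, 1, -1, 2, -2, ...
--     def S(k):
--       if k == 0:
--         return 0
--       return -((k - 1) // 2) if (k - 1) % 2 == 0 else k // 2
--   else:
--     m = abs(d)
--     s = 1 if d > 0 else -1
--     # increment sequence is s*(-1)^k*(m+k); its partial sums in closed form:
--     def S(k):
--       return -s * (k // 2) if k % 2 == 0 else s * (m + (k - 1) // 2)
--
--   return [v0] + [v0 + S(i) for i in range(1, N)]
-- ===== Notes on version B (the rewrite author's own statement) =====
-- stated objective: alternative
-- what changed: B drops A's loop that threads the mutating increment d and instead builds each element directly from v0 plus a closed-form partial-sum formula S(k) for the alternating increment series (with the d==0 series as its own case).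
import Mathlib
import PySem

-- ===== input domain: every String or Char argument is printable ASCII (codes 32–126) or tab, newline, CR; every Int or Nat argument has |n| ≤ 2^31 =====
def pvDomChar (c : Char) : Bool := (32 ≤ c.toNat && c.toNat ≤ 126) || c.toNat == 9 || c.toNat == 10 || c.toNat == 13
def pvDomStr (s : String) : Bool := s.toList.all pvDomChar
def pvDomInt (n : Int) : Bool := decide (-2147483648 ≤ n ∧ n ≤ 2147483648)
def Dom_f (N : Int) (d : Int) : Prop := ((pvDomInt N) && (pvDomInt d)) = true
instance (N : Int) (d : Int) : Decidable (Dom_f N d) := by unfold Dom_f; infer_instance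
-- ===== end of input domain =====

-- B replaces A's loop threading the mutating increment d by a closed-form offset
-- formula for each position (alternative decomposition, same cost).


-- ===== PORT A =====
def f (N : Int) (d : Int) : List Int :=
  let v0 : Int :=
    if PySem.Int.mod N 2 = 1 then PySem.Int.floordiv N 2 + 1
    else if d = 1 then PySem.Int.floordiv N 2
    else PySem.Int.floordiv N 2 + 1
  -- for i in range(N-1): ret.append(ret[-1] + d); d = -(d+1) if d > 0 else -(d-1)
  -- ret is never empty, so ret[-1] (pyGet? at -1) always returns some; the getD 0 default is never used
  (List.foldl
    (fun (st : List Int × Int) (_i : Int) =>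
      (st.1 ++ [(PySem.List.pyGet? st.1 (-1)).getD 0 + st.2],
       if st.2 > 0 then -(st.2 + 1) else -(st.2 - 1)))
    ([v0], d) (PySem.List.pyRange 0 (N - 1) 1)).1

-- ===== PORT B =====
-- closed-form offset S(k) of element k relative to element 0 (Source B's S)
def Sclosed (d : Int) (k : Int) : Int :=
  if d = 0 then
    if k = 0 then 0
    else if PySem.Int.mod (k - 1) 2 = 0 then -(PySem.Int.floordiv (k - 1) 2)
    else PySem.Int.floordiv k 2
  else
    let m : Int := |d|
    let s : Int := if d > 0 then 1 else -1
    if PySem.Int.mod k 2 = 0 then -s * PySem.Int.floordiv k 2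
    else s * (m + PySem.Int.floordiv (k - 1) 2)

def f_alt (N : Int) (d : Int) : List Int :=
  let v0 : Int :=
    if PySem.Int.mod N 2 = 1 then PySem.Int.floordiv N 2 + 1
    else if d = 1 then PySem.Int.floordiv N 2
    else PySem.Int.floordiv N 2 + 1
  v0 :: (PySem.List.pyRange 1 N 1).map (fun i => v0 + Sclosed d i)

-- ===== PRECONDITION & SPEC =====
def Spec_f (N : Int) (d : Int) (out : List Int) : Prop := out = f_alt N d
instance (N : Int) (d : Int) (out : List Int) : Decidable (Spec_f N d out) := by unfold Spec_f; infer_instance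

-- ===== CLAIM (what is proved, stated in full; the proofs are below) =====
def Claim_equal_f : Prop := ∀ (N : Int) (d : Int), Dom_f N d → Spec_f N d (f N d)

-- ===== LEMMAS AND PROOFS =====

-- A's update of d after each step
def upd (d : Int) : Int := if d > 0 then -(d + 1) else -(d - 1)

-- A's one loop iteration as a state transformer
def stepA (st : List Int × Int) : List Int × Int :=
  (st.1 ++ [(PySem.List.pyGet? st.1 (-1)).getD 0 + st.2], upd st.2)

-- the list A's loop produces: k further elements after x, threading d
def g : Nat → Int → Int → List Int
  | 0, x, _ => [x]
  | k + 1, x, d => x :: g k (x + d) (upd d)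

-- total offset after j steps starting with increment d
def T : Int → Nat → Int
  | _, 0 => 0
  | d, j + 1 => d + T (upd d) j

lemma foldl_const {σ α : Type} (h : σ → σ) (st : σ) (xs : List α) :
    xs.foldl (fun s _ => h s) st = h^[xs.length] st := by
  induction xs generalizing st with
  | nil => rfl
  | cons y ys ih => simp [List.foldl, ih, Function.iterate_succ_apply]

lemma iterA (k : Nat) : ∀ (l : List Int) (x d : Int),
    (stepA^[k] (l ++ [x], d)).1 = l ++ g k x d := by
  induction k with
  | zero => intro l x d; simp [g]
  | succ k ih =>
    intro l x d
    rw [Function.iterate_succ_apply]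
    have hstep : stepA (l ++ [x], d) = ((l ++ [x]) ++ [x + d], upd d) := by
      simp [stepA, PySem.List.pyGet?_neg_one_append_singleton]
    rw [hstep, ih (l ++ [x]) (x + d) (upd d)]
    simp [g]

lemma g_eq_map (k : Nat) : ∀ (x d : Int),
    g k x d = (List.range (k + 1)).map (fun j => x + T d j) := by
  induction k with
  | zero => intro x d; simp [g, T]
  | succ k ih =>
    intro x d
    rw [show k + 1 + 1 = (k + 1) + 1 from rfl, List.range_succ_eq_map]
    simp only [List.map_cons, List.map_map]
    rw [g, ih (x + d) (upd d)]
    simp [T, Function.comp, add_assoc]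

lemma T_pos (j : Nat) : ∀ (d : Int), 0 < d →
    T d j = if j % 2 = 0 then -((j / 2 : Nat) : Int) else d + ((j / 2 : Nat) : Int) := by
  induction j using Nat.twoStepInduction with
  | zero => intro d hd; simp [T]
  | one => intro d hd; simp [T]
  | more j ih _ =>
    intro d hd
    have h1 : upd d = -(d + 1) := by simp [upd, hd]
    have h2 : upd (-(d + 1)) = d + 2 := by
      simp only [upd]; rw [if_neg (by omega)]; ring
    have hT : T d (j + 2) = d + (upd d + T (upd (upd d)) j) := rfl
    rw [hT, h1, h2, ih (d + 2) (by omega)]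
    rcases Nat.even_or_odd j with he | ho
    · have hj : j % 2 = 0 := Nat.even_iff.mp he
      rw [if_pos hj, if_pos (by omega : (j + 2) % 2 = 0)]
      omega
    · have hj : j % 2 = 1 := Nat.odd_iff.mp ho
      rw [if_neg (by omega), if_neg (by omega : ¬ (j + 2) % 2 = 0)]
      omega

lemma T_neg (j : Nat) : ∀ (d : Int), d < 0 →
    T d j = if j % 2 = 0 then ((j / 2 : Nat) : Int) else d - ((j / 2 : Nat) : Int) := by
  induction j using Nat.twoStepInduction with
  | zero => intro d hd; simp [T]
  | one =>
    intro d hd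
    have hT : T d 1 = d + T (upd d) 0 := rfl
    rw [hT, if_neg (by omega : ¬ (1 : Nat) % 2 = 0)]
    simp [T]
  | more j ih _ =>
    intro d hd
    have h1 : upd d = -(d - 1) := by simp only [upd]; rw [if_neg (by omega)]
    have h2 : upd (-(d - 1)) = d - 2 := by
      simp only [upd]; rw [if_pos (by omega)]; ring
    have hT : T d (j + 2) = d + (upd d + T (upd (upd d)) j) := rfl
    rw [hT, h1, h2, ih (d - 2) (by omega)]
    rcases Nat.even_or_odd j with he | ho
    · have hj : j % 2 = 0 := Nat.even_iff.mp he
      rw [if_pos hj, if_pos (by omega : (j + 2) % 2 = 0)]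
      omega
    · have hj : j % 2 = 1 := Nat.odd_iff.mp ho
      rw [if_neg (by omega), if_neg (by omega : ¬ (j + 2) % 2 = 0)]
      omega

lemma T_zero (j : Nat) :
    T 0 j = if j = 0 then 0
      else if (j - 1) % 2 = 0 then -(((j - 1) / 2 : Nat) : Int) else ((j / 2 : Nat) : Int) := by
  cases j with
  | zero => simp [T]
  | succ j =>
    have h1 : upd 0 = 1 := by simp [upd]
    have hT : T 0 (j + 1) = 0 + T (upd 0) j := rfl
    rw [hT, h1, T_pos j 1 (by omega), if_neg (by omega : ¬ j + 1 = 0)]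
    rcases Nat.even_or_odd j with he | ho
    · have hj : j % 2 = 0 := Nat.even_iff.mp he
      rw [if_pos hj, if_pos (by omega : (j + 1 - 1) % 2 = 0)]
      omega
    · have hj : j % 2 = 1 := Nat.odd_iff.mp ho
      rw [if_neg (by omega), if_neg (by omega : ¬ (j + 1 - 1) % 2 = 0)]
      omega

lemma T_eq_Sclosed (d : Int) (j : Nat) : T d j = Sclosed d (j : Int) := by
  have e2 : (0 : Int) < 2 := by norm_num
  rcases lt_trichotomy d 0 with hd | hd | hd
  · rw [T_neg j d hd]
    simp only [Sclosed]
    rw [if_neg (by omega : ¬ d = 0), if_neg (by omega : ¬ d > 0), abs_of_neg hd]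
    simp only [PySem.Int.mod_eq_emod_of_pos e2, PySem.Int.floordiv_eq_ediv_of_pos e2]
    rcases Nat.even_or_odd j with he | ho
    · have hj : j % 2 = 0 := Nat.even_iff.mp he
      rw [if_pos hj, if_pos (by omega : (j : Int) % 2 = 0)]
      omega
    · have hj : j % 2 = 1 := Nat.odd_iff.mp ho
      rw [if_neg (by omega), if_neg (by omega : ¬ (j : Int) % 2 = 0)]
      have h3 : ((j : Int) - 1) / 2 = ((j / 2 : Nat) : Int) := by omega
      rw [h3]; ring
  · subst hd
    rw [T_zero j]
    simp only [Sclosed]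
    rw [if_pos trivial]
    simp only [PySem.Int.mod_eq_emod_of_pos e2, PySem.Int.floordiv_eq_ediv_of_pos e2]
    rcases Nat.eq_zero_or_pos j with h0 | h0
    · subst h0; norm_num
    · rw [if_neg (by omega : ¬ j = 0), if_neg (by omega : ¬ (j : Int) = 0)]
      rcases Nat.even_or_odd (j - 1) with he | ho
      · have hj : (j - 1) % 2 = 0 := Nat.even_iff.mp he
        rw [if_pos hj, if_pos (by omega : ((j : Int) - 1) % 2 = 0)]
        omega
      · have hj : (j - 1) % 2 = 1 := Nat.odd_iff.mp ho
        rw [if_neg (by omega), if_neg (by omega : ¬ ((j : Int) - 1) % 2 = 0)]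
        omega
  · rw [T_pos j d hd]
    simp only [Sclosed]
    rw [if_neg (by omega : ¬ d = 0), if_pos (by omega : d > 0), abs_of_pos hd]
    simp only [PySem.Int.mod_eq_emod_of_pos e2, PySem.Int.floordiv_eq_ediv_of_pos e2]
    rcases Nat.even_or_odd j with he | ho
    · have hj : j % 2 = 0 := Nat.even_iff.mp he
      rw [if_pos hj, if_pos (by omega : (j : Int) % 2 = 0)]
      omega
    · have hj : j % 2 = 1 := Nat.odd_iff.mp ho
      rw [if_neg (by omega), if_neg (by omega : ¬ (j : Int) % 2 = 0)]
      have h3 : ((j : Int) - 1) / 2 = ((j / 2 : Nat) : Int) := by omega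
      rw [h3]; ring

lemma mainA (N d v0 : Int) :
    (List.foldl
      (fun (st : List Int × Int) (_i : Int) =>
        (st.1 ++ [(PySem.List.pyGet? st.1 (-1)).getD 0 + st.2],
         if st.2 > 0 then -(st.2 + 1) else -(st.2 - 1)))
      ([v0], d) (PySem.List.pyRange 0 (N - 1) 1)).1
    = v0 :: (PySem.List.pyRange 1 N 1).map (fun i => v0 + Sclosed d i) := by
  have hstep : (fun (st : List Int × Int) (_i : Int) =>
        (st.1 ++ [(PySem.List.pyGet? st.1 (-1)).getD 0 + st.2],
         if st.2 > 0 then -(st.2 + 1) else -(st.2 - 1)))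
      = (fun (s : List Int × Int) (_ : Int) => stepA s) := by
    funext s i; simp [stepA, upd]
  rw [hstep, foldl_const stepA ([v0], d), PySem.List.length_pyRange_one]
  rw [show N - 1 - 0 = N - 1 from by ring]
  have h1 := iterA (N - 1).toNat [] v0 d
  simp only [List.nil_append] at h1
  rw [h1, g_eq_map, List.range_succ_eq_map, PySem.List.pyRange_one]
  simp only [List.map_cons, List.map_map]
  congr 1
  · simp [T]
  · apply List.map_congr_left
    intro k _
    simp only [Function.comp]
    rw [show k.succ = k + 1 from rfl, T_eq_Sclosed]
    congr 1
    congr 1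
    push_cast
    ring

lemma f_eq (N d : Int) : f N d = f_alt N d := by
  unfold f f_alt
  exact mainA N d _

-- ===== VERDICT (by name: the statement is the Claim_ definition above) =====
theorem f_spec : Claim_equal_f := by
  intro N d _
  unfold Spec_f
  exact f_eq N d
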